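-- pv_equiv track=rewrite | github.com/romankozyrev01/training2021 | converter.py | _find_collection_patterns
-- ===== SOURCE A (Python) =====
-- def _find_collection_patterns(line):
--     patterns = []
--     pattern = ""
--     opened = False
--     for symb in line:
--         if opened:
--             pattern += symb
--
--         if symb == '"':
--             if opened:
--                 opened = False
--                 patterns.append(pattern.replace('"', ''))
--                 pattern = ""
--             elif not opened:
--                 opened = True
--     return patterns
-- ===== SOURCE B (Python) =====
-- import re
--
-- def _find_collection_patterns(line):
--     return re.findall(r'"([^"]*)"', line)
-- ===== Notes on version B (the rewrite author's own statement) =====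
-- stated objective: idiomatic
-- what changed: The hand-written char-by-char toggle state machine is replaced by a single re.findall call whose pattern captures the maximal run of non-quote characters between each non-overlapping pair of double quotes.
import Mathlib
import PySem

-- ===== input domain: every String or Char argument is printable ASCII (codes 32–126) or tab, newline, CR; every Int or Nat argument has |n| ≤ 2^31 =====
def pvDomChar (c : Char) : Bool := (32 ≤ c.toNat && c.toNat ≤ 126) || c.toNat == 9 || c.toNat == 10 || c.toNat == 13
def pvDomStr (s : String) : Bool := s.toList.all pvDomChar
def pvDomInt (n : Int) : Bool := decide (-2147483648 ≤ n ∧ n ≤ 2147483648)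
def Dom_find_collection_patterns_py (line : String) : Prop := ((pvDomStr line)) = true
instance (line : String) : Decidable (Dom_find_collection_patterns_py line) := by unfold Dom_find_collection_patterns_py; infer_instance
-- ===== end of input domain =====

-- B replaces A's char-by-char toggle state machine by a single regex findall scan: idiomatic, and a timing run measured it faster (C-level scan vs a Python-level loop).

-- ===== PORT A =====
-- A's for-loop over the line with state (patterns, pattern, opened), transcribed as
-- structural recursion over the same state. pattern.replace('"','') is exact as
-- List.filter (· ≠ '"') (it removes every '"' character).
def pvAGo : List String → List Char → Bool → List Char → List String
  | patterns, _pattern, _opened, [] => patterns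
  | patterns, pattern, opened, c :: cs =>
    let pattern1 := if opened then pattern ++ [c] else pattern
    if c = '"' then
      if opened then
        pvAGo (patterns ++ [String.ofList (pattern1.filter (· ≠ '"'))]) [] false cs
      else
        pvAGo patterns pattern1 true cs
    else
      pvAGo patterns pattern1 opened cs

def find_collection_patterns_py (line : String) : List String :=
  pvAGo [] [] false line.toList

-- ===== PORT B =====
-- Port of re.findall(r'"([^"]*)"', line): scan left to right for an opening '"',
-- capture the maximal run of non-'"' characters ([^"]*), and require a closing '"';
-- an opening quote with no closing quote matches nothing (exact regex semantics here).
def pvBGo : List Char → List String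
  | [] => []
  | c :: cs =>
    if c = '"' then
      if cs.dropWhile (· ≠ '"') = [] then []
      else String.ofList (cs.takeWhile (· ≠ '"')) :: pvBGo (cs.dropWhile (· ≠ '"')).tail
    else
      pvBGo cs
termination_by cs => cs.length
decreasing_by
  · have h1 : (cs.dropWhile (· ≠ '"')).length ≤ cs.length := List.length_dropWhile_le _ _
    have h2 : (cs.dropWhile (· ≠ '"')).tail.length ≤ (cs.dropWhile (· ≠ '"')).length := by
      cases cs.dropWhile (· ≠ '"') <;> simp
    simp only [List.length_cons]
    omega
  · simp only [List.length_cons]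
    omega

def find_collection_patterns_py_alt (line : String) : List String :=
  pvBGo line.toList

-- ===== PRECONDITION & SPEC =====
def Spec_find_collection_patterns_py (line : String) (out : List String) : Prop := out = find_collection_patterns_py_alt line
instance (line : String) (out : List String) : Decidable (Spec_find_collection_patterns_py line out) := by unfold Spec_find_collection_patterns_py; infer_instance

-- ===== CLAIM (what is proved, stated in full; the proofs are below) =====
def Claim_equal_find_collection_patterns_py : Prop := ∀ (line : String), Dom_find_collection_patterns_py line → Spec_find_collection_patterns_py line (find_collection_patterns_py line)

-- ===== LEMMAS AND PROOFS =====

theorem filter_takeWhile_ne (cs : List Char) :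
    (cs.takeWhile (· ≠ '"')).filter (· ≠ '"') = cs.takeWhile (· ≠ '"') := by
  apply List.filter_eq_self.2
  intro c hc
  have := List.mem_takeWhile_imp hc
  simpa using this

-- the combined invariant: closed state ≡ pvBGo, open state ≡ the capture step
theorem pvAGo_eq (cs : List Char) :
    (∀ patterns, pvAGo patterns [] false cs = patterns ++ pvBGo cs) ∧
    (∀ patterns pat, pvAGo patterns pat true cs =
      if cs.dropWhile (· ≠ '"') = [] then patterns
      else (patterns ++
             [String.ofList ((pat ++ cs.takeWhile (· ≠ '"')).filter (· ≠ '"'))])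
            ++ pvBGo (cs.dropWhile (· ≠ '"')).tail) := by
  induction cs with
  | nil =>
    refine ⟨fun patterns => ?_, fun patterns pat => ?_⟩
    · rw [pvBGo]; simp [pvAGo]
    · simp [pvAGo, List.dropWhile]
  | cons c cs ih =>
    refine ⟨fun patterns => ?_, fun patterns pat => ?_⟩
    · by_cases hc : c = '"'
      · subst hc
        have h2 := ih.2 patterns []
        rw [pvBGo]
        simp only [pvAGo, Bool.false_eq_true, if_false, if_true, List.nil_append, if_pos rfl] at *
        rw [h2]
        by_cases hdw : cs.dropWhile (· ≠ '"') = []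
        · rw [if_pos hdw, if_pos hdw]; simp
        · rw [if_neg hdw, if_neg hdw, filter_takeWhile_ne]; simp
      · rw [pvBGo]
        simp only [pvAGo, Bool.false_eq_true, if_false, if_neg hc, List.nil_append]
        rw [ih.1 patterns]
    · by_cases hc : c = '"'
      · subst hc
        simp only [pvAGo, if_true, if_pos rfl, List.nil_append]
        rw [ih.1]
        have hf : (pat ++ ['"']).filter (· ≠ '"') = pat.filter (· ≠ '"') := by
          simp [List.filter_append]
        simp [List.dropWhile, List.takeWhile, hf]
      · simp only [pvAGo, if_true, if_neg hc]
        rw [ih.2 patterns (pat ++ [c])]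
        simp [List.dropWhile, List.takeWhile, hc, List.append_assoc]

-- ===== VERDICT (by name: the statement is the Claim_ definition above) =====
theorem find_collection_patterns_py_spec : Claim_equal_find_collection_patterns_py := by
  intro line _
  unfold Spec_find_collection_patterns_py find_collection_patterns_py find_collection_patterns_py_alt
  simpa using (pvAGo_eq line.toList).1 []
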